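-- pv_equiv track=rewrite | github.com/7anan5anom/albleu | albleu.py | one_stem
-- ===== SOURCE A (Python) =====
-- def one_stem(words,dict,n):
--     length = len(words)
--     array = {}
--     #for the segment fitched from i to i+n
--     for i in range(length+1-n):
--         seg = []
--         stem_track = [""]*n
--         for j in range(n):
--             seg.append([])
--
--         stemCount = 0
--         #for each word within the segment
--         count = 0
--         for st in range(i,i+n):
--             for j in range(n):
--                 if j == stemCount:
--                     if words[st] in dict.keys():
--                         stem = dict[words[st]]
--                         if len(stem) > 0:
--                             seg[j].append(stem[0])
--                             stem_track[count] = stem[0]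
--                             count += 1
--                 else:
--                     seg[j].append(words[st])
--             stemCount += 1
--         count = 0
--         for j in range(n):
--             if len(seg[j]) == n:
--                 array[(i,stem_track[count])] =" ".join(seg[j])
--                 count+=1
--     return array
-- ===== SOURCE B (Python) =====
-- def one_stem(words, dict, n):
--     array = {}
--     if n <= 0:
--         return array
--     for i in range(len(words) - n + 1):
--         window = words[i:i+n]
--         for j, w in enumerate(window):
--             stems = dict.get(w)
--             if stems:
--                 array[(i, stems[0])] = ' '.join(window[:j] + [stems[0]] + window[j+1:])
--     return array
-- ===== Notes on version B (the rewrite author's own statement) =====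
-- stated objective: faster
-- what changed: B builds each one-stemmed variant independently per window position via slicing (window[:j] + [stem] + window[j+1:]) and inserts it directly, doing work only at stemmable positions, instead of A's column-wise construction of n parallel candidate lists (n^2 appends per window regardless of the dict) with stem_track/count bookkeeping and a separate length-n filtering pass.
import Mathlib
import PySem

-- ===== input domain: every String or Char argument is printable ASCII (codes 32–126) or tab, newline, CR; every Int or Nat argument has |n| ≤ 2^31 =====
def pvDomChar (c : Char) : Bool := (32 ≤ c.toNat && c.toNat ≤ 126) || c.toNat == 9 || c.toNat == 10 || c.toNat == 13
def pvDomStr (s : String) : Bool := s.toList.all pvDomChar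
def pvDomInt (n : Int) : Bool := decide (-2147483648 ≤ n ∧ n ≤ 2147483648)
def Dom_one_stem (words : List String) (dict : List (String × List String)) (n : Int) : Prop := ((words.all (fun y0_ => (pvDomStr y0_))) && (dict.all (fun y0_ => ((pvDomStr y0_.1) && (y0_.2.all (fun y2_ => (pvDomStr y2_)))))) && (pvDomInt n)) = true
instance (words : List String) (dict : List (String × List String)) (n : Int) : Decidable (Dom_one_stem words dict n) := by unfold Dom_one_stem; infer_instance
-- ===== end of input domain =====

-- B builds each one-stemmed window variant directly per position via slicing, doing work only at stemmable positions, replacing A's parallel column-wise seg/stem_track/count bookkeeping (objective: faster, measured).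


-- ===== PORT A =====
-- A's dict accumulator is keyed by the pair (i, stem); items are flattened to triples on return.
-- inner 'for j in range(n)' body (state: seg, stem_track, count)
def aJBody (D : PySem.Dict String (List String)) (words : List String) (st stemCount : Int)
    (acc : List (List String) × List String × Int) (j : Int) :
    List (List String) × List String × Int :=
  if j == stemCount then
    match PySem.Dict.get? D (PySem.List.pyGetD words st "") with
    | some stem =>
        if ((stem.length : Int) > 0) then
          (PySem.List.pySetD acc.1 j
             (PySem.List.pyGetD acc.1 j [] ++ [PySem.List.pyGetD stem 0 ""]),
           PySem.List.pySetD acc.2.1 acc.2.2 (PySem.List.pyGetD stem 0 ""),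
           acc.2.2 + 1)
        else acc
    | none => acc
  else
    (PySem.List.pySetD acc.1 j (PySem.List.pyGetD acc.1 j [] ++ [PySem.List.pyGetD words st ""]),
     acc.2.1, acc.2.2)

-- 'for st in range(i, i+n)' body (state: seg, stem_track, stemCount, count)
def aStBody (D : PySem.Dict String (List String)) (words : List String) (n : Int)
    (state : List (List String) × List String × Int × Int) (st : Int) :
    List (List String) × List String × Int × Int :=
  let inner := (PySem.List.pyRange 0 n 1).foldl (aJBody D words st state.2.2.1)
                 (state.1, state.2.1, state.2.2.2)
  (inner.1, inner.2.1, state.2.2.1 + 1, inner.2.2)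

-- final 'for j in range(n)' body (state: array, count)
def aFinBody (i n : Int) (seg : List (List String)) (stem_track : List String)
    (acc : PySem.Dict (Int × String) String × Int) (j : Int) :
    PySem.Dict (Int × String) String × Int :=
  if (((PySem.List.pyGetD seg j []).length : Int) == n) then
    (acc.1.insert (i, PySem.List.pyGetD stem_track acc.2 "")
       (PySem.Str.join " " (PySem.List.pyGetD seg j [])),
     acc.2 + 1)
  else acc

-- 'for i in range(length+1-n)' body
def aIBody (D : PySem.Dict String (List String)) (words : List String) (n : Int)
    (array : PySem.Dict (Int × String) String) (i : Int) :
    PySem.Dict (Int × String) String :=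
  let seg0 : List (List String) :=
    (PySem.List.pyRange 0 n 1).foldl (fun s _ => s ++ [([] : List String)]) []
  let track0 : List String := List.replicate n.toNat ""
  let res := (PySem.List.pyRange i (i + n) 1).foldl (aStBody D words n)
               (seg0, track0, (0 : Int), (0 : Int))
  ((PySem.List.pyRange 0 n 1).foldl (aFinBody i n res.1 res.2.1) (array, (0 : Int))).1

def one_stem (words : List String) (dict : List (String × List String)) (n : Int) : List (Int × String × String) :=
  let length : Int := (words.length : Int)
  let D := PySem.Dict.mk dict
  let array := (PySem.List.pyRange 0 (length + 1 - n) 1).foldl (aIBody D words n) PySem.Dict.empty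
  array.items.map (fun p => (p.1.1, p.1.2, p.2))

-- ===== PORT B =====
-- 'for j, w in enumerate(window)' body
def bJBody (D : PySem.Dict String (List String)) (i : Int) (window : List String)
    (array : PySem.Dict (Int × String) String) (jw : Int × String) :
    PySem.Dict (Int × String) String :=
  match PySem.Dict.get? D jw.2 with
  | some stems =>
      if stems ≠ [] then
        array.insert (i, PySem.List.pyGetD stems 0 "")
          (PySem.Str.join " "
            (PySem.List.slice window none (some jw.1) ++
             [PySem.List.pyGetD stems 0 ""] ++
             PySem.List.slice window (some (jw.1 + 1)) none))
      else array
  | none => array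

-- 'for i in range(len(words) - n + 1)' body
def bIBody (D : PySem.Dict String (List String)) (words : List String) (n : Int)
    (array : PySem.Dict (Int × String) String) (i : Int) :
    PySem.Dict (Int × String) String :=
  let window := PySem.List.slice words (some i) (some (i + n))
  (PySem.List.enumerate window 0).foldl (bJBody D i window) array

def one_stem_alt (words : List String) (dict : List (String × List String)) (n : Int) : List (Int × String × String) :=
  let D := PySem.Dict.mk dict
  let array : PySem.Dict (Int × String) String :=
    if n ≤ 0 then PySem.Dict.empty
    else (PySem.List.pyRange 0 ((words.length : Int) - n + 1) 1).foldl (bIBody D words n) PySem.Dict.empty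
  array.items.map (fun p => (p.1.1, p.1.2, p.2))

-- ===== PRECONDITION & SPEC =====
def Spec_one_stem (words : List String) (dict : List (String × List String)) (n : Int) (out : List (Int × String × String)) : Prop := out = one_stem_alt words dict n
instance (words : List String) (dict : List (String × List String)) (n : Int) (out : List (Int × String × String)) : Decidable (Spec_one_stem words dict n out) := by unfold Spec_one_stem; infer_instance

-- ===== CLAIM (what is proved, stated in full; the proofs are below) =====
def Claim_equal_one_stem : Prop := ∀ (words : List String) (dict : List (String × List String)) (n : Int), Dom_one_stem words dict n → Spec_one_stem words dict n (one_stem words dict n)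

-- ===== LEMMAS AND PROOFS =====

-- first stem of a word, if the word is in the dict with a nonempty stem list
def stemOf (D : PySem.Dict String (List String)) (w : String) : Option String :=
  match PySem.Dict.get? D w with
  | some l => if l ≠ [] then some (PySem.List.pyGetD l 0 "") else none
  | none => none

def stems (D : PySem.Dict String (List String)) (l : List String) : List String :=
  l.filterMap (stemOf D)

-- state of column j of seg after k words of the window have been processed
def segCol (D : PySem.Dict String (List String)) (win : List String) (j k : Nat) : List String :=
  win.take (min j k) ++ (if j < k then (stemOf D (win.getD j "")).toList else [])
    ++ (win.drop (j + 1)).take (k - (j + 1))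

-- the canonical per-window update both bodies compute
def canonBody (D : PySem.Dict String (List String)) (i : Int) (win : List String)
    (a : PySem.Dict (Int × String) String) (j : Nat) : PySem.Dict (Int × String) String :=
  match stemOf D (win.getD j "") with
  | some s => a.insert (i, s) (PySem.Str.join " " (win.take j ++ [s] ++ win.drop (j + 1)))
  | none => a

def canonFrom (D : PySem.Dict String (List String)) (i : Int) (win : List String)
    (j0 : Nat) (a : PySem.Dict (Int × String) String) : PySem.Dict (Int × String) String :=
  ((List.range win.length).drop j0).foldl (canonBody D i win) a


-- --- generic loop-shape lemmas ---

-- a fold whose body leaves the second component untouched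
theorem foldl_keep_snd {α β : Type} (l : List Int)
    (body : α × β → Int → α × β) (g : α → Int → α)
    (h : ∀ (s : α) (t : β) (j : Int), j ∈ l → body (s, t) j = (g s j, t)) :
    ∀ (s : α) (t : β), l.foldl body (s, t) = (l.foldl g s, t) := by
  induction l with
  | nil => intro s t; rfl
  | cons x xs ih =>
      intro s t
      simp only [List.foldl_cons, h s t x (List.mem_cons_self)]
      exact ih (fun s t j hj => h s t j (List.mem_cons_of_mem _ hj)) _ _

-- set at a (Nat-cast) index of a map-over-range
theorem pySetD_map_range {β : Type} {m : Nat} (f : Nat → β) (k : Nat) (_hk : k < m) (v : β) :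
    PySem.List.pySetD ((List.range m).map f) ((k : Nat) : Int) v
      = (List.range m).map (fun j => if j = k then v else f j) := by
  rw [PySem.List.pySetD_of_nonneg _ _ (by positivity)]
  have hkn : ((k : Int)).toNat = k := by omega
  rw [hkn]
  apply List.ext_getElem (by simp)
  intro j h1 h2
  rw [List.getElem_set]
  simp only [List.getElem_map, List.getElem_range]
  by_cases h : j = k
  · simp [h]
  · simp [h, Ne.symm h]

theorem pyGetD_map_range {β : Type} {m : Nat} (f : Nat → β) (k : Nat) (hk : k < m) (d : β) :
    PySem.List.pyGetD ((List.range m).map f) ((k : Nat) : Int) d = f k := by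
  rw [PySem.List.pyGetD_natCast]
  exact PySem.List.getD_map_range f m k d hk

theorem pySetD_map_range' {β : Type} {m : Nat} (f : Nat → β) (ki : Int) (h0 : 0 ≤ ki)
    (hk : ki < (m : Int)) (v : β) :
    PySem.List.pySetD ((List.range m).map f) ki v
      = (List.range m).map (fun j => if j = ki.toNat then v else f j) := by
  have h : ki = ((ki.toNat : Nat) : Int) := by omega
  rw [h]
  exact pySetD_map_range f ki.toNat (by omega) v

theorem pyGetD_map_range' {β : Type} {m : Nat} (f : Nat → β) (ki : Int) (h0 : 0 ≤ ki)
    (hk : ki < (m : Int)) (d : β) :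
    PySem.List.pyGetD ((List.range m).map f) ki d = f ki.toNat := by
  have h : ki = ((ki.toNat : Nat) : Int) := by omega
  rw [h]
  exact pyGetD_map_range f ki.toNat (by omega) d

-- 'for j in range(a,b): seg[j].append(x)' over a list presented as a map over range m
theorem foldl_setAppend {m : Nat} (f : Nat → List String) (x : String) :
    ∀ (d : Nat) (a b : Int), 0 ≤ a → b ≤ (m : Int) → (b - a).toNat = d →
    (PySem.List.pyRange a b 1).foldl
        (fun s j => PySem.List.pySetD s j (PySem.List.pyGetD s j [] ++ [x]))
        ((List.range m).map f)
      = (List.range m).map (fun (j : Nat) => if a ≤ (j : Int) ∧ (j : Int) < b then f j ++ [x] else f j) := by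
  intro d
  induction d with
  | zero =>
      intro a b h0 hb hd
      rw [PySem.List.pyRange_one_eq_nil (by omega)]
      apply List.map_congr_left
      intro j hj
      rw [if_neg (by omega)]
  | succ d ih =>
      intro a b h0 hb hd
      have hsplit : PySem.List.pyRange a b 1 = PySem.List.pyRange a (b - 1) 1 ++ [b - 1] := by
        have h := PySem.List.pyRange_one_succ_right (a := a) (b := b - 1) (by omega)
        simpa using h
      rw [hsplit, List.foldl_append, ih a (b - 1) h0 (by omega) (by omega)]
      simp only [List.foldl_cons, List.foldl_nil]
      rw [pyGetD_map_range' (fun (j : Nat) => if a ≤ (j : Int) ∧ (j : Int) < b - 1 then f j ++ [x] else f j)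
          (b - 1) (by omega) (by omega) [],
        pySetD_map_range' (fun (j : Nat) => if a ≤ (j : Int) ∧ (j : Int) < b - 1 then f j ++ [x] else f j)
          (b - 1) (by omega) (by omega)]
      apply List.map_congr_left
      intro j hj
      simp only [List.mem_range] at hj
      by_cases hjk : j = (b - 1).toNat
      · subst hjk
        rw [if_pos rfl, if_neg (by omega), if_pos (by constructor <;> omega)]
      · rw [if_neg hjk]
        by_cases hc : a ≤ (j : Int) ∧ (j : Int) < b - 1
        · rw [if_pos hc, if_pos ⟨hc.1, by omega⟩]
        · rw [if_neg hc, if_neg (by omega)]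


-- --- stems bookkeeping ---

theorem stems_take_succ (D : PySem.Dict String (List String)) (l : List String) (k : Nat)
    (hk : k < l.length) :
    stems D (l.take (k + 1)) = stems D (l.take k) ++ (stemOf D (l.getD k "")).toList := by
  rw [stems, stems, List.take_add_one, List.filterMap_append]
  congr 1
  rw [List.getElem?_eq_getElem hk, List.getD_eq_getElem _ _ hk]
  cases h : stemOf D l[k] <;> simp [h]

theorem stems_len_le (D : PySem.Dict String (List String)) (l : List String) (j : Nat) :
    (stems D (l.take j)).length ≤ j := by
  calc (stems D (l.take j)).length ≤ (l.take j).length := List.length_filterMap_le _ _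
  _ ≤ j := by simp

theorem stems_getD (D : PySem.Dict String (List String)) :
    ∀ (l : List String) (j : Nat) (s : String), j < l.length →
    stemOf D (l.getD j "") = some s →
    (stems D (l.take j)).length < (stems D l).length ∧
      (stems D l).getD ((stems D (l.take j)).length) "" = s := by
  intro l
  induction l with
  | nil => intro j s hj; simp at hj
  | cons x t ih =>
      intro j s hj hs
      cases j with
      | zero =>
          simp only [List.getD_cons_zero] at hs
          simp [stems, hs]
      | succ j =>
          simp only [List.getD_cons_succ] at hs
          have hj' : j < t.length := by simpa using hj
          obtain ⟨h1, h2⟩ := ih j s hj' hs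
          cases hx : stemOf D x <;>
            simp [stems, hx, List.take_succ_cons] at * <;>
            exact ⟨h1, h2⟩

-- --- the A-side window loop ---

theorem seg0_eq (D : PySem.Dict String (List String)) (win : List String) (m : Nat) :
    (PySem.List.pyRange 0 ((m : Nat) : Int) 1).foldl (fun s _ => s ++ [([] : List String)]) []
      = (List.range m).map (fun j => segCol D win j 0) := by
  rw [PySem.List.foldl_append_singleton_eq_map (fun _ => ([] : List String))]
  apply List.ext_getElem (by simp [PySem.List.length_pyRange_one])
  intro j h1 h2
  simp [segCol]

theorem segCol_succ_lt (D : PySem.Dict String (List String)) (win : List String) {m : Nat}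
    (hm : win.length = m) (j k : Nat) (hj : j < k) (hk : k < m) :
    segCol D win j k ++ [win.getD k ""] = segCol D win j (k + 1) := by
  rw [segCol, segCol, Nat.min_eq_left (by omega), Nat.min_eq_left (by omega),
    if_pos hj, if_pos (by omega)]
  simp only [List.append_assoc]
  congr 2
  rw [show k + 1 - (j + 1) = (k - (j + 1)) + 1 by omega, List.take_add_one]
  congr 1
  rw [List.getElem?_drop, show j + 1 + (k - (j + 1)) = k by omega,
    List.getElem?_eq_getElem (by omega), List.getD_eq_getElem _ _ (by omega)]
  rfl

theorem segCol_succ_eq (D : PySem.Dict String (List String)) (win : List String) (k : Nat) :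
    segCol D win k k ++ (stemOf D (win.getD k "")).toList = segCol D win k (k + 1) := by
  rw [segCol, segCol, Nat.min_self, Nat.min_eq_left (by omega),
    if_neg (by omega), if_pos (by omega)]
  simp

theorem segCol_succ_gt (D : PySem.Dict String (List String)) (win : List String) {m : Nat}
    (hm : win.length = m) (j k : Nat) (hj : k < j) (hk : k < m) :
    segCol D win j k ++ [win.getD k ""] = segCol D win j (k + 1) := by
  rw [segCol, segCol, Nat.min_eq_right (by omega), Nat.min_eq_right (by omega),
    if_neg (by omega), if_neg (by omega),
    show k - (j + 1) = 0 by omega, show k + 1 - (j + 1) = 0 by omega]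
  simp only [List.take_zero, List.append_nil]
  rw [List.take_add_one]
  congr 1
  rw [List.getElem?_eq_getElem (by omega), List.getD_eq_getElem _ _ (by omega)]
  rfl

theorem aJBody_stem_step (D : PySem.Dict String (List String)) (words : List String) (st : Int)
    (win : List String) {m : Nat} (hm : win.length = m) (k : Nat) (hkm : k < m)
    (hw : PySem.List.pyGetD words st "" = win.getD k "") (g : Nat → List String)
    (hgk : g k = segCol D win k k) :
    aJBody D words st ((k : Nat) : Int)
      ((List.range m).map g,
       stems D (win.take k) ++ List.replicate (m - (stems D (win.take k)).length) "",
       ((stems D (win.take k)).length : Int)) ((k : Nat) : Int)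
    = ((List.range m).map (fun j =>
         if j = k then segCol D win k k ++ (stemOf D (win.getD k "")).toList else g j),
       stems D (win.take (k + 1)) ++ List.replicate (m - (stems D (win.take (k + 1))).length) "",
       ((stems D (win.take (k + 1))).length : Int)) := by
  have hjw : k < win.length := by omega
  have hL : (stems D (win.take k)).length < m := by
    have := stems_len_le D win k; omega
  simp only [aJBody, BEq.rfl, if_pos]
  rw [hw]
  cases hq : PySem.Dict.get? D (win.getD k "") with
  | none =>
      have hso : stemOf D (win.getD k "") = none := by rw [stemOf, hq]
      have hc0 : stems D (win.take (k + 1)) = stems D (win.take k) := by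
        rw [stems_take_succ D win k hjw, hso]; simp
      rw [hc0, hso]
      simp only [Option.toList_none, List.append_nil]
      congr 1
      apply List.map_congr_left
      intro j hj
      by_cases hjk : j = k
      · subst hjk; rw [if_pos rfl, hgk]
      · rw [if_neg hjk]
  | some stem =>
      dsimp only
      by_cases hst : stem = []
      · have hso : stemOf D (win.getD k "") = none := by rw [stemOf, hq]; simp [hst]
        have hc0 : stems D (win.take (k + 1)) = stems D (win.take k) := by
          rw [stems_take_succ D win k hjw, hso]; simp
        rw [if_neg (by simp [hst])]
        rw [hc0, hso]
        simp only [Option.toList_none, List.append_nil]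
        congr 1
        apply List.map_congr_left
        intro j hj
        by_cases hjk : j = k
        · subst hjk; rw [if_pos rfl, hgk]
        · rw [if_neg hjk]
      · have hlp : 0 < stem.length := List.length_pos_iff.mpr hst
        have hso : stemOf D (win.getD k "") = some (PySem.List.pyGetD stem 0 "") := by
          rw [stemOf, hq]; simp [hst]
        have hc1 : stems D (win.take (k + 1))
            = stems D (win.take k) ++ [PySem.List.pyGetD stem 0 ""] := by
          rw [stems_take_succ D win k hjw, hso]; rfl
        rw [if_pos (by exact_mod_cast hlp)]
        rw [pyGetD_map_range g k hkm, hgk,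
          pySetD_map_range g k hkm (segCol D win k k ++ [PySem.List.pyGetD stem 0 ""])]
        refine congrArg₂ _ ?_ (congrArg₂ _ ?_ ?_)
        · apply List.map_congr_left
          intro j hj
          rw [hso]
          rfl
        · rw [PySem.List.pySetD_of_nonneg _ _ (by positivity), Int.toNat_natCast,
            List.set_append, if_neg (by omega), Nat.sub_self,
            show m - (stems D (win.take k)).length
              = (m - (stems D (win.take k)).length - 1) + 1 by omega,
            List.replicate_succ, List.set_cons_zero, hc1]
          simp only [List.length_append, List.length_cons, List.length_nil, List.append_assoc,
            List.singleton_append]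
          rw [show m - ((stems D (List.take k win)).length + (0 + 1))
              = m - (stems D (List.take k win)).length - 1 by omega]
        · rw [hc1]
          simp only [List.length_append, List.length_cons, List.length_nil]
          push_cast
          ring

theorem stloop (D : PySem.Dict String (List String)) (words : List String) (i : Int)
    (win : List String) {m : Nat} (hm : win.length = m)
    (hwin : ∀ k : Nat, k < m → PySem.List.pyGetD words (i + (k : Int)) "" = win.getD k "") :
    ∀ (k : Nat), k ≤ m →
    (PySem.List.pyRange i (i + (k : Int)) 1).foldl (aStBody D words ((m : Nat) : Int))
        ((List.range m).map (fun j => segCol D win j 0), List.replicate m "", (0 : Int), (0 : Int))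
      = ((List.range m).map (fun j => segCol D win j k),
         stems D (win.take k) ++ List.replicate (m - (stems D (win.take k)).length) "",
         (k : Int), ((stems D (win.take k)).length : Int)) := by
  intro k
  induction k with
  | zero =>
      intro _
      rw [show i + ((0 : Nat) : Int) = i by push_cast; ring,
        PySem.List.pyRange_one_eq_nil le_rfl, List.foldl_nil]
      simp [stems]
  | succ k ih =>
      intro hk1
      have hkm : k < m := by omega
      rw [show i + ((k + 1 : Nat) : Int) = (i + ((k : Nat) : Int)) + 1 by push_cast; ring,
        PySem.List.pyRange_one_succ_right (by omega), List.foldl_append, ih (by omega),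
        List.foldl_cons, List.foldl_nil]
      rw [aStBody]
      simp only
      have hinner : List.foldl (aJBody D words (i + ((k : Nat) : Int)) ((k : Nat) : Int))
          ((List.range m).map (fun j => segCol D win j k),
           stems D (win.take k) ++ List.replicate (m - (stems D (win.take k)).length) "",
           ((stems D (win.take k)).length : Int))
          (PySem.List.pyRange 0 ((m : Nat) : Int) 1)
        = ((List.range m).map (fun j => segCol D win j (k + 1)),
           stems D (win.take (k + 1)) ++ List.replicate (m - (stems D (win.take (k + 1))).length) "",
           ((stems D (win.take (k + 1))).length : Int)) := by
        rw [PySem.List.pyRange_one_append 0 ((k : Nat) : Int) ((m : Nat) : Int) (by omega) (by omega),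
          List.foldl_append]
        rw [foldl_keep_snd (PySem.List.pyRange 0 ((k : Nat) : Int) 1)
              (aJBody D words (i + ((k : Nat) : Int)) ((k : Nat) : Int))
              (fun s j => PySem.List.pySetD s j (PySem.List.pyGetD s j [] ++ [win.getD k ""]))
              (fun s t j hj => by
                obtain ⟨h1, h2⟩ := PySem.List.mem_pyRange_one.mp hj
                simp only [aJBody]
                rw [hwin k hkm, if_neg (by simp only [beq_iff_eq]; omega)])]
        rw [foldl_setAppend (fun j => segCol D win j k) (win.getD k "") k 0 ((k : Nat) : Int)
              (by omega) (by omega) (by omega)]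
        rw [PySem.List.pyRange_one_cons (show ((k : Nat) : Int) < ((m : Nat) : Int) by exact_mod_cast hkm),
          List.foldl_cons]
        rw [aJBody_stem_step D words (i + ((k : Nat) : Int)) win hm k hkm (hwin k hkm) _
              (by rw [if_neg (by omega)])]
        rw [foldl_keep_snd (PySem.List.pyRange (((k : Nat) : Int) + 1) ((m : Nat) : Int) 1)
              (aJBody D words (i + ((k : Nat) : Int)) ((k : Nat) : Int))
              (fun s j => PySem.List.pySetD s j (PySem.List.pyGetD s j [] ++ [win.getD k ""]))
              (fun s t j hj => by
                obtain ⟨h1, h2⟩ := PySem.List.mem_pyRange_one.mp hj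
                simp only [aJBody]
                rw [hwin k hkm, if_neg (by simp only [beq_iff_eq]; omega)])]
        rw [foldl_setAppend _ (win.getD k "") (m - (k + 1)) (((k : Nat) : Int) + 1) ((m : Nat) : Int)
              (by omega) (by omega) (by omega)]
        refine congrArg₂ _ ?_ rfl
        apply List.map_congr_left
        intro j hj
        simp only [List.mem_range] at hj
        rcases lt_trichotomy j k with hlt | heq | hgt
        · rw [if_neg (by omega), if_neg (by omega), if_pos (by constructor <;> omega)]
          exact segCol_succ_lt D win hm j k hlt hkm
        · subst heq
          rw [if_neg (by omega), if_pos rfl]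
          exact segCol_succ_eq D win j
        · rw [if_pos (by constructor <;> omega), if_neg (by omega), if_neg (by omega)]
          exact segCol_succ_gt D win hm j k hgt hkm
      rw [hinner]
      refine congrArg₂ _ rfl (congrArg₂ _ rfl (congrArg₂ _ ?_ rfl))
      push_cast
      ring


theorem segCol_length (D : PySem.Dict String (List String)) (win : List String) {m : Nat}
    (hm : win.length = m) (j0 : Nat) (hj : j0 < m) :
    (segCol D win j0 m).length = j0 + (stemOf D (win.getD j0 "")).toList.length + (m - j0 - 1) := by
  simp [segCol, hm, hj, Nat.min_eq_left (Nat.le_of_lt hj)]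
  omega

theorem canonFrom_step (D : PySem.Dict String (List String)) (i : Int) (win : List String)
    {m : Nat} (hm : win.length = m) (j0 : Nat) (hj : j0 < m)
    (a : PySem.Dict (Int × String) String) :
    canonFrom D i win j0 a = canonFrom D i win (j0 + 1) (canonBody D i win a j0) := by
  rw [canonFrom, canonFrom, hm]
  rw [List.drop_eq_getElem_cons (by simpa using hj), List.foldl_cons, List.getElem_range]

-- --- the A-side final loop ---

theorem finloop (D : PySem.Dict String (List String)) (i : Int) (win : List String) {m : Nat}
    (hm : win.length = m) :
    ∀ (j0 : Nat), j0 ≤ m → ∀ (array : PySem.Dict (Int × String) String),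
    (PySem.List.pyRange ((j0 : Nat) : Int) ((m : Nat) : Int) 1).foldl
        (aFinBody i ((m : Nat) : Int) ((List.range m).map (fun j => segCol D win j m))
          (stems D win ++ List.replicate (m - (stems D win).length) ""))
        (array, ((stems D (win.take j0)).length : Int))
      = (canonFrom D i win j0 array, ((stems D win).length : Int)) := by
  suffices h : ∀ (d j0 : Nat), j0 ≤ m → m - j0 = d → ∀ (array : PySem.Dict (Int × String) String),
      (PySem.List.pyRange ((j0 : Nat) : Int) ((m : Nat) : Int) 1).foldl
        (aFinBody i ((m : Nat) : Int) ((List.range m).map (fun j => segCol D win j m))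
          (stems D win ++ List.replicate (m - (stems D win).length) ""))
        (array, ((stems D (win.take j0)).length : Int))
      = (canonFrom D i win j0 array, ((stems D win).length : Int)) by
    intro j0 hj0 array
    exact h (m - j0) j0 hj0 rfl array
  intro d
  induction d with
  | zero =>
      intro j0 hj0 hd array
      have hj0m : j0 = m := by omega
      subst hj0m
      rw [PySem.List.pyRange_one_eq_nil (by omega), List.foldl_nil]
      rw [canonFrom, List.take_of_length_le (by omega),
        List.drop_eq_nil_of_le (by simp [hm]), List.foldl_nil]
  | succ d ih =>
      intro j0 hj0 hd array
      have hjm : j0 < m := by omega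
      rw [PySem.List.pyRange_one_cons (by exact_mod_cast hjm), List.foldl_cons]
      rw [canonFrom_step D i win hm j0 hjm]
      rw [aFinBody]
      rw [pyGetD_map_range (fun j => segCol D win j m) j0 hjm []]
      have hlen := segCol_length D win hm j0 hjm
      have hcast : (((j0 : Nat) : Int) + 1) = (((j0 + 1 : Nat) : Nat) : Int) := by push_cast; ring
      have hjw : j0 < win.length := by omega
      cases hs : stemOf D (win.getD j0 "") with
      | none =>
          rw [hs] at hlen
          have hc0 : stems D (win.take (j0 + 1)) = stems D (win.take j0) := by
            rw [stems_take_succ D win j0 hjw, hs]; simp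
          have hcb : canonBody D i win array j0 = array := by
            simp only [canonBody]; rw [hs]
          rw [if_neg (by simp only [beq_iff_eq]; rw [hlen]; simp; omega)]
          rw [hcb, hcast, ← hc0]
          exact ih (j0 + 1) (by omega) (by omega) array
      | some s =>
          rw [hs] at hlen
          obtain ⟨hlt, hgd⟩ := stems_getD D win j0 s hjw hs
          have hc1 : stems D (win.take (j0 + 1)) = stems D (win.take j0) ++ [s] := by
            rw [stems_take_succ D win j0 hjw, hs]; rfl
          have htr : PySem.List.pyGetD
              (stems D win ++ List.replicate (m - (stems D win).length) "")
              (((stems D (win.take j0)).length : Nat) : Int) "" = s := by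
            rw [PySem.List.pyGetD_natCast,
              List.getD_append _ _ _ _ hlt, hgd]
          have hseg : segCol D win j0 m = win.take j0 ++ ([s] ++ win.drop (j0 + 1)) := by
            rw [segCol, hs, Nat.min_eq_left (Nat.le_of_lt hjm), if_pos hjm,
              List.take_of_length_le (i := m - (j0 + 1)) (l := win.drop (j0 + 1))
                (by simp [hm])]
            simp [List.append_assoc]
          have hcb : canonBody D i win array j0
              = array.insert (i, s) (PySem.Str.join " " (win.take j0 ++ [s] ++ win.drop (j0 + 1))) := by
            simp only [canonBody]; rw [hs]
          rw [if_pos (by simp only [beq_iff_eq]; rw [hlen]; simp only [Option.toList_some,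
            List.length_cons, List.length_nil]; omega)]
          rw [htr, hseg, hcb, hcast]
          have hcnt : ((stems D (win.take j0)).length : Int) + 1
              = ((stems D (win.take (j0 + 1))).length : Int) := by
            rw [hc1]; simp [List.length_append]
          rw [hcnt, List.append_assoc]
          exact ih (j0 + 1) (by omega) (by omega) _

-- --- the B-side window loop ---

theorem bInner (D : PySem.Dict String (List String)) (i : Int) (win : List String)
    (array : PySem.Dict (Int × String) String) :
    (PySem.List.enumerate win 0).foldl (bJBody D i win) array = canonFrom D i win 0 array := by
  rw [canonFrom, List.drop_zero, PySem.List.enumerate_eq_map_pyRange win "", List.foldl_map,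
    PySem.List.len_eq, PySem.List.pyRange_zero_nat, List.foldl_map]
  apply PySem.List.foldl_congr_mem
  intro acc j hj
  simp only [List.mem_range] at hj
  show bJBody D i win acc ((j : Int), PySem.List.pyGetD win (j : Int) "") = canonBody D i win acc j
  rw [bJBody, canonBody, stemOf, PySem.List.pyGetD_natCast]
  cases hg : PySem.Dict.get? D (win.getD j "") with
  | none => rfl
  | some stems =>
      have h1 : PySem.List.slice win none (some ((j : Nat) : Int)) = win.take j :=
        PySem.List.slice_to_natCast win j
      have h2 : PySem.List.slice win (some ((j : Int) + 1)) none = win.drop (j + 1) := by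
        have hc : (j : Int) + 1 = ((j + 1 : Nat) : Int) := by push_cast; ring
        rw [hc]
        exact PySem.List.slice_from_natCast win (j + 1)
      by_cases he : stems = []
      · simp [he]
      · simp [he, h1, h2, List.append_assoc]

-- --- per-window bodies agree ---

theorem body_eq (D : PySem.Dict String (List String)) (words : List String) (n i : Int)
    (hn : 1 ≤ n) (hi : 0 ≤ i) (hin : i + n ≤ (words.length : Int))
    (array : PySem.Dict (Int × String) String) :
    aIBody D words n array i = bIBody D words n array i := by
  obtain ⟨m, rfl⟩ : ∃ m : Nat, n = (m : Int) := ⟨n.toNat, by omega⟩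
  rw [aIBody, bIBody]
  simp only [Int.toNat_natCast]
  set win := PySem.List.slice words (some i) (some (i + (m : Int))) with hwdef
  have hwl : win.length = m := by
    rw [hwdef, PySem.List.slice_toNat words hi (by omega)]
    simp only [List.length_take, List.length_drop]
    omega
  have hwin : ∀ k : Nat, k < m → PySem.List.pyGetD words (i + (k : Int)) "" = win.getD k "" := by
    intro k hk
    have hik : (0 : Int) ≤ i + (k : Int) := by omega
    have hik2 : i + (k : Int) < (words.length : Int) := by omega
    rw [PySem.List.pyGetD_eq_getElem words "" hik hik2,
      hwdef, PySem.List.slice_toNat words hi (by omega)]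
    rw [List.getD_eq_getElem _ _ (by
      simp only [List.length_take, List.length_drop]; omega)]
    rw [List.getElem_take, List.getElem_drop]
    congr 1
    omega
  rw [seg0_eq D win m, stloop D words i win hwl hwin m le_rfl]
  simp only
  have hfin := finloop D i win hwl 0 (by omega) array
  simp only [Nat.cast_zero, List.take_zero, show stems D [] = [] from rfl,
    List.length_nil] at hfin
  rw [List.take_of_length_le (l := win) (i := m) (by omega), hfin]
  exact (bInner D i win array).symm

-- ===== VERDICT =====

theorem foldl_const {α β : Type} (l : List β) (a : α) : l.foldl (fun x _ => x) a = a := by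
  induction l generalizing a with
  | nil => rfl
  | cons x xs ih => exact ih a

theorem aIBody_nonpos (D : PySem.Dict String (List String)) (words : List String) (n : Int)
    (hn : n ≤ 0) (array : PySem.Dict (Int × String) String) (i : Int) :
    aIBody D words n array i = array := by
  rw [aIBody]
  rw [PySem.List.pyRange_one_eq_nil hn, List.foldl_nil]

theorem one_stem_spec : Claim_equal_one_stem := by
  intro words dict n _
  rw [Spec_one_stem, one_stem, one_stem_alt]
  by_cases hn : n ≤ 0
  · rw [if_pos hn]
    rw [PySem.List.foldl_congr_mem _ _ (fun a _ => a) _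
      (fun acc i _ => aIBody_nonpos (PySem.Dict.mk dict) words n hn acc i)]
    rw [foldl_const]
  · rw [if_neg hn]
    rw [show (words.length : Int) + 1 - n = (words.length : Int) - n + 1 by ring]
    rw [PySem.List.foldl_congr_mem _ _ (bIBody (PySem.Dict.mk dict) words n) _
      (fun acc i hi => by
        obtain ⟨h1, h2⟩ := PySem.List.mem_pyRange_one.mp hi
        exact body_eq (PySem.Dict.mk dict) words n i (by omega) h1 (by omega) acc)]
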